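-- pv_equiv track=rewrite | github.com/LeeYoonhyeok/Coding | Algorithms/DP/파이프옮기기1/이윤혁.py | count_movement
-- ===== SOURCE A (Python) =====
-- def count_movement(N, house):
--     dp = [[[0] * 3 for _ in range(N)] for _ in range(N)]
--     dp[0][1][0] = 1
--     for x in range(N):
--         for y in range(N):
--             if house[x][y] == 1:
--                 continue
--
--             # 가로로 (x,y)에 이동한 경우 : 가로 or 대각선으로 들어옴
--             if y >= 1:
--                 dp[x][y][0] += dp[x][y-1][0] + dp[x][y-1][2]
--
--             # 세로로 (x,y)에 이동한 경우 : 세로 or 대각선으로 들어옴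
--             if x >= 1:
--                 dp[x][y][1] += dp[x-1][y][1] + dp[x-1][y][2]
--
--             # 대각선으로 (x,y)에 이동한 경우 : 가로 or 세로 or 대각선으로 들어옴
--             if x >= 1 and y >= 1 and house[x][y-1] == 0 and house[x-1][y] == 0:
--                 dp[x][y][2] += dp[x-1][y-1][0] + dp[x-1][y-1][1] + dp[x-1][y-1][2]
--
--     return sum(dp[N-1][N-1])
-- ===== SOURCE B (Python) =====
-- def count_movement(N, house):
--     # Top-down memoized recursion instead of A's bottom-up 3D table.
--     memo = {}
--
--     def ways(x, y, d):
--         if (x, y, d) == (0, 1, 0):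
--             return 1
--         key = (x, y, d)
--         if key in memo:
--             return memo[key]
--         if house[x][y] == 1:
--             r = 0
--         elif d == 0:
--             r = ways(x, y - 1, 0) + ways(x, y - 1, 2) if y >= 1 else 0
--         elif d == 1:
--             r = ways(x - 1, y, 1) + ways(x - 1, y, 2) if x >= 1 else 0
--         else:
--             if x >= 1 and y >= 1 and house[x][y - 1] == 0 and house[x - 1][y] == 0:
--                 r = ways(x - 1, y - 1, 0) + ways(x - 1, y - 1, 1) + ways(x - 1, y - 1, 2)
--             else:
--                 r = 0
--         memo[key] = r
--         return r
--
--     return ways(N - 1, N - 1, 0) + ways(N - 1, N - 1, 1) + ways(N - 1, N - 1, 2)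
-- ===== Notes on version B (the rewrite author's own statement) =====
-- stated objective: alternative
-- what changed: Replaces A's bottom-up 3D DP table filled by a double loop with a top-down memoized recursion ways(x,y,d) evaluated from the target cell.
import Mathlib
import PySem

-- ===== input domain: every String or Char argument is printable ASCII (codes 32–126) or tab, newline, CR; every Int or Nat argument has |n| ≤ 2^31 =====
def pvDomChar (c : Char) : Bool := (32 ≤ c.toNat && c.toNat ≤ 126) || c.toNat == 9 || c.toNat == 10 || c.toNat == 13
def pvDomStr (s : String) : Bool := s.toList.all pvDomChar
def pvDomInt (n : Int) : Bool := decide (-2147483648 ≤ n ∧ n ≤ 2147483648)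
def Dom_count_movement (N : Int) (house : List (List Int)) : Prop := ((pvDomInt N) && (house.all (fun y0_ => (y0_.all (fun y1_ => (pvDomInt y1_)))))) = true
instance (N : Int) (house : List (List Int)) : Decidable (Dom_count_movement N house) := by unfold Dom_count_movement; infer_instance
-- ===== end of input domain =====

-- B rewrites A's bottom-up 3D table as a top-down memoized recursion (same values; objective: alternative decomposition).

-- house[x][y] (indices are nonneg and in range on Pre_; default never observed there)
def pvH (house : List (List Int)) (x y : Int) : Int :=
  PySem.List.pyGetD (PySem.List.pyGetD house x []) y 0

-- ===== PORT A =====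
-- A's 3D table dp, encoded as a finite map from index triples (absent = 0); dp[0][1][0] = 1
def pvRd (dp : PySem.Dict (Int × Int × Int) Int) (x y d : Int) : Int := dp.getD (x, y, d) 0

-- the body of A's double loop at cell (x, y)
def pvStepA (house : List (List Int)) (dp : PySem.Dict (Int × Int × Int) Int) (x y : Int) :
    PySem.Dict (Int × Int × Int) Int :=
  if pvH house x y = 1 then dp
  else
    let dp1 := if 1 ≤ y then
        dp.insert (x, y, 0) (pvRd dp x y 0 + pvRd dp x (y-1) 0 + pvRd dp x (y-1) 2)
      else dp
    let dp2 := if 1 ≤ x then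
        dp1.insert (x, y, 1) (pvRd dp1 x y 1 + pvRd dp1 (x-1) y 1 + pvRd dp1 (x-1) y 2)
      else dp1
    if 1 ≤ x ∧ 1 ≤ y ∧ pvH house x (y-1) = 0 ∧ pvH house (x-1) y = 0 then
      dp2.insert (x, y, 2) (pvRd dp2 x y 2 + pvRd dp2 (x-1) (y-1) 0 + pvRd dp2 (x-1) (y-1) 1 +
        pvRd dp2 (x-1) (y-1) 2)
    else dp2

def count_movement (N : Int) (house : List (List Int)) : Int :=
  let dp0 : PySem.Dict (Int × Int × Int) Int := PySem.Dict.empty.insert (0, 1, 0) 1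
  let dp := (PySem.List.pyRange 0 N 1).foldl
    (fun dp x => (PySem.List.pyRange 0 N 1).foldl (fun dp y => pvStepA house dp x y) dp) dp0
  pvRd dp (N-1) (N-1) 0 + pvRd dp (N-1) (N-1) 1 + pvRd dp (N-1) (N-1) 2

-- ===== PORT B =====
-- ways(x, y, d) of Source B (memoisation dropped: it does not change the value)
def pvWays (house : List (List Int)) (x y : Nat) (d : Int) : Int :=
  if x = 0 ∧ y = 1 ∧ d = 0 then 1
  else if pvH house (x : Int) (y : Int) = 1 then 0
  else if d = 0 then
    (if _h : 1 ≤ y then pvWays house x (y-1) 0 + pvWays house x (y-1) 2 else 0)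
  else if d = 1 then
    (if _h : 1 ≤ x then pvWays house (x-1) y 1 + pvWays house (x-1) y 2 else 0)
  else
    (if _h : 1 ≤ x ∧ 1 ≤ y ∧ pvH house (x : Int) ((y-1 : Nat) : Int) = 0 ∧
          pvH house ((x-1 : Nat) : Int) (y : Int) = 0 then
      pvWays house (x-1) (y-1) 0 + pvWays house (x-1) (y-1) 1 + pvWays house (x-1) (y-1) 2
    else 0)
termination_by x + y
decreasing_by all_goals omega

def count_movement_alt (N : Int) (house : List (List Int)) : Int :=
  pvWays house (N-1).toNat (N-1).toNat 0 + pvWays house (N-1).toNat (N-1).toNat 1 +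
    pvWays house (N-1).toNat (N-1).toNat 2

-- ===== PRECONDITION & SPEC =====
-- exactly the inputs where Python A returns (otherwise it raises IndexError):
-- N ≥ 2 and the first N rows of house exist and each has at least N entries
def Pre_count_movement (N : Int) (house : List (List Int)) : Prop :=
  2 ≤ N ∧ N ≤ (house.length : Int) ∧ ∀ row ∈ house.take N.toNat, N ≤ (row.length : Int)
instance (N : Int) (house : List (List Int)) : Decidable (Pre_count_movement N house) := by
  unfold Pre_count_movement; infer_instance

def pvWitness_count_movement : Int × List (List Int) := (2, [[0, 0], [0, 0]])

def Spec_count_movement (N : Int) (house : List (List Int)) (out : Int) : Prop := out = count_movement_alt N house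
instance (N : Int) (house : List (List Int)) (out : Int) : Decidable (Spec_count_movement N house out) := by unfold Spec_count_movement; infer_instance

-- ===== CLAIM (what is proved, stated in full; the proofs are below) =====
def Claim_equal_count_movement : Prop := ∀ (N : Int) (house : List (List Int)), Dom_count_movement N house → Pre_count_movement N house → Spec_count_movement N house (count_movement N house)

-- ===== LEMMAS AND PROOFS =====

-- the initial table value: all zeros except dp[0][1][0] = 1
def pvInit (a b d : Int) : Int := if a = 0 ∧ b = 1 ∧ d = 0 then 1 else 0

-- Int-indexed view of pvWays
def pvG (house : List (List Int)) (x y d : Int) : Int := pvWays house x.toNat y.toNat d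

lemma pvG_eq (house : List (List Int)) (x y d : Int) (hx : 0 ≤ x) (hy : 0 ≤ y) :
    pvG house x y d =
      if x = 0 ∧ y = 1 ∧ d = 0 then 1
      else if pvH house x y = 1 then 0
      else if d = 0 then (if 1 ≤ y then pvG house x (y-1) 0 + pvG house x (y-1) 2 else 0)
      else if d = 1 then (if 1 ≤ x then pvG house (x-1) y 1 + pvG house (x-1) y 2 else 0)
      else (if 1 ≤ x ∧ 1 ≤ y ∧ pvH house x (y-1) = 0 ∧ pvH house (x-1) y = 0 then
              pvG house (x-1) (y-1) 0 + pvG house (x-1) (y-1) 1 + pvG house (x-1) (y-1) 2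
            else 0) := by
  have hxx : ((x.toNat : Int)) = x := Int.toNat_of_nonneg hx
  have hyy : ((y.toNat : Int)) = y := Int.toNat_of_nonneg hy
  have e1 : (x - 1).toNat = x.toNat - 1 := by omega
  have e2 : (y - 1).toNat = y.toNat - 1 := by omega
  simp only [pvG, e1, e2]
  conv_lhs => rw [pvWays]
  simp only [dite_eq_ite]
  rw [hxx, hyy]
  apply if_congr (by omega) rfl
  apply if_congr Iff.rfl rfl
  apply if_congr Iff.rfl
  · exact if_congr (by omega) rfl rfl
  apply if_congr Iff.rfl
  · exact if_congr (by omega) rfl rfl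
  refine if_congr ?_ rfl rfl
  constructor
  · rintro ⟨h1, h2, h3, h4⟩
    have c1 : ((y.toNat - 1 : Nat) : Int) = y - 1 := by omega
    have c2 : ((x.toNat - 1 : Nat) : Int) = x - 1 := by omega
    exact ⟨by omega, by omega, by rwa [c1] at h3, by rwa [c2] at h4⟩
  · rintro ⟨h1, h2, h3, h4⟩
    have c1 : ((y.toNat - 1 : Nat) : Int) = y - 1 := by omega
    have c2 : ((x.toNat - 1 : Nat) : Int) = x - 1 := by omega
    exact ⟨by omega, by omega, by rwa [c1], by rwa [c2]⟩

-- the loop invariant: cells lexicographically before (x, y) (within the N×N grid) hold their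
-- final value pvG, everything else still holds the initial table value
def pvInv (N : Int) (house : List (List Int)) (x y : Int)
    (dp : PySem.Dict (Int × Int × Int) Int) : Prop :=
  ∀ a b d : Int, (d = 0 ∨ d = 1 ∨ d = 2) →
    pvRd dp a b d = if 0 ≤ a ∧ a < N ∧ 0 ≤ b ∧ b < N ∧ (a < x ∨ (a = x ∧ b < y)) then
                 pvG house a b d else pvInit a b d

lemma pvRd_insert (dp : PySem.Dict (Int × Int × Int) Int) (x y d v a b c : Int) :
    pvRd (dp.insert (x, y, d) v) a b c = if a = x ∧ b = y ∧ c = d then v else pvRd dp a b c := by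
  rw [pvRd, pvRd, PySem.Dict.getD_insert]
  exact if_congr (by simp [Prod.ext_iff]) rfl rfl

lemma pvRd_at_pt (dp : PySem.Dict (Int × Int × Int) Int) (x y d v a b c : Int)
    (h : ¬ (a = x ∧ b = y)) : pvRd (dp.insert (x, y, d) v) a b c = pvRd dp a b c := by
  rw [pvRd_insert, if_neg (fun hh => h ⟨hh.1, hh.2.1⟩)]

lemma pvRd_at_d (dp : PySem.Dict (Int × Int × Int) Int) (x y d v c : Int) (h : c ≠ d) :
    pvRd (dp.insert (x, y, d) v) x y c = pvRd dp x y c := by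
  rw [pvRd_insert, if_neg (fun hh => h hh.2.2)]

lemma pvRd_at_self (dp : PySem.Dict (Int × Int × Int) Int) (x y d v : Int) :
    pvRd (dp.insert (x, y, d) v) x y d = v := by
  rw [pvRd_insert, if_pos ⟨rfl, rfl, rfl⟩]

lemma pvStepA_ne (house : List (List Int)) (dp : PySem.Dict (Int × Int × Int) Int)
    (x y a b c : Int) (hne : ¬ (a = x ∧ b = y)) :
    pvRd (pvStepA house dp x y) a b c = pvRd dp a b c := by
  have key : ∀ (dp' : PySem.Dict (Int × Int × Int) Int) (d' v : Int),
      pvRd (dp'.insert (x, y, d') v) a b c = pvRd dp' a b c :=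
    fun dp' d' v => pvRd_at_pt dp' x y d' v a b c hne
  simp only [pvStepA]
  split_ifs <;> simp only [key]

lemma pvStepA_at0 (house : List (List Int)) (dp : PySem.Dict (Int × Int × Int) Int) (x y : Int)
    (hopen : ¬ pvH house x y = 1) :
    pvRd (pvStepA house dp x y) x y 0 =
      if 1 ≤ y then pvRd dp x y 0 + pvRd dp x (y-1) 0 + pvRd dp x (y-1) 2 else pvRd dp x y 0 := by
  simp only [pvStepA]
  have hx1 : ¬ ((x:Int) - 1 = x ∧ (y:Int) = y) := by omega
  have hy1 : ¬ ((x:Int) = x ∧ y - 1 = y) := by omega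
  have hd : ¬ ((x:Int) - 1 = x ∧ (y:Int) - 1 = y) := by omega
  split_ifs <;>
    simp_all [pvRd_at_self, pvRd_at_pt, pvRd_at_d]

lemma pvStepA_at1 (house : List (List Int)) (dp : PySem.Dict (Int × Int × Int) Int) (x y : Int)
    (hopen : ¬ pvH house x y = 1) :
    pvRd (pvStepA house dp x y) x y 1 =
      if 1 ≤ x then pvRd dp x y 1 + pvRd dp (x-1) y 1 + pvRd dp (x-1) y 2 else pvRd dp x y 1 := by
  simp only [pvStepA]
  have hx1 : ¬ ((x:Int) - 1 = x ∧ (y:Int) = y) := by omega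
  have hy1 : ¬ ((x:Int) = x ∧ y - 1 = y) := by omega
  have hd : ¬ ((x:Int) - 1 = x ∧ (y:Int) - 1 = y) := by omega
  split_ifs <;>
    simp_all [pvRd_at_self, pvRd_at_pt, pvRd_at_d]

lemma pvStepA_at2 (house : List (List Int)) (dp : PySem.Dict (Int × Int × Int) Int) (x y : Int)
    (hopen : ¬ pvH house x y = 1) :
    pvRd (pvStepA house dp x y) x y 2 =
      if 1 ≤ x ∧ 1 ≤ y ∧ pvH house x (y-1) = 0 ∧ pvH house (x-1) y = 0 then
        pvRd dp x y 2 + pvRd dp (x-1) (y-1) 0 + pvRd dp (x-1) (y-1) 1 + pvRd dp (x-1) (y-1) 2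
      else pvRd dp x y 2 := by
  simp only [pvStepA]
  have hx1 : ¬ ((x:Int) - 1 = x ∧ (y:Int) = y) := by omega
  have hy1 : ¬ ((x:Int) = x ∧ y - 1 = y) := by omega
  have hd : ¬ ((x:Int) - 1 = x ∧ (y:Int) - 1 = y) := by omega
  split_ifs <;>
    simp_all [pvRd_at_self, pvRd_at_pt, pvRd_at_d]

lemma pvG_zero (house : List (List Int)) (d : Int) (hd : d = 0 ∨ d = 1 ∨ d = 2) :
    pvG house 0 0 d = 0 := by
  rw [pvG_eq house 0 0 d le_rfl le_rfl]
  rcases hd with rfl | rfl | rfl <;> split_ifs <;> first | rfl | omega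

lemma pvG_blocked (house : List (List Int)) (x y d : Int) (hx : 0 ≤ x) (hy : 0 ≤ y)
    (hb : pvH house x y = 1) : pvG house x y d = pvInit x y d := by
  rw [pvG_eq house x y d hx hy]
  by_cases hbase : x = 0 ∧ y = 1 ∧ d = 0
  · rw [if_pos hbase, pvInit, if_pos hbase]
  · rw [if_neg hbase, if_pos hb, pvInit, if_neg hbase]

lemma pvStep_inv (N : Int) (house : List (List Int)) (x y : Int)
    (dp : PySem.Dict (Int × Int × Int) Int) (hx : 0 ≤ x) (hxN : x < N) (hy : 0 ≤ y) (hyN : y < N)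
    (h : pvInv N house x y dp) : pvInv N house x (y+1) (pvStepA house dp x y) := by
  intro a b d hd
  by_cases hab : a = x ∧ b = y
  · obtain ⟨rfl, rfl⟩ := hab
    rw [if_pos ⟨hx, hxN, hy, hyN, Or.inr ⟨rfl, by omega⟩⟩]
    by_cases hb : pvH house a b = 1
    · simp only [pvStepA, if_pos hb]
      have h0 := h a b d hd
      rw [if_neg (by omega)] at h0
      rw [h0, pvG_blocked house a b d hx hy hb]
    · have hinit : ∀ d' : Int, (d' = 0 ∨ d' = 1 ∨ d' = 2) → pvRd dp a b d' = pvInit a b d' := by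
        intro d' hd'
        have h0 := h a b d' hd'
        rwa [if_neg (by omega)] at h0
      rcases hd with rfl | rfl | rfl
      · rw [pvStepA_at0 house dp a b hb, pvG_eq house a b 0 hx hy]
        by_cases hy1 : 1 ≤ b
        · have r0 := h a (b-1) 0 (Or.inl rfl)
          rw [if_pos ⟨hx, hxN, by omega, by omega, Or.inr ⟨rfl, by omega⟩⟩] at r0
          have r2 := h a (b-1) 2 (Or.inr (Or.inr rfl))
          rw [if_pos ⟨hx, hxN, by omega, by omega, Or.inr ⟨rfl, by omega⟩⟩] at r2
          rw [if_pos hy1, hinit 0 (Or.inl rfl), r0, r2]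
          by_cases hbase : a = 0 ∧ b = 1
          · rw [if_pos ⟨hbase.1, hbase.2, rfl⟩]
            obtain ⟨rfl, rfl⟩ := hbase
            norm_num [pvG_zero house 0 (Or.inl rfl), pvG_zero house 2 (Or.inr (Or.inr rfl)),
              pvInit]
          · rw [if_neg (fun hh => hbase ⟨hh.1, hh.2.1⟩), if_neg hb, if_pos rfl, if_pos hy1,
              pvInit, if_neg (fun hh => hbase ⟨hh.1, hh.2.1⟩), zero_add]
        · rw [if_neg hy1, hinit 0 (Or.inl rfl),
            if_neg (fun hh => hy1 (by omega : (1:Int) ≤ b)), if_neg hb, if_pos rfl,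
            if_neg hy1, pvInit, if_neg (fun hh => hy1 (by omega : (1:Int) ≤ b))]
      · rw [pvStepA_at1 house dp a b hb, pvG_eq house a b 1 hx hy]
        have hnb : ¬ (a = 0 ∧ b = 1 ∧ (1:Int) = 0) := fun hh => by omega
        rw [if_neg hnb, if_neg hb, if_neg (by norm_num : ¬ (1:Int) = 0), if_pos rfl]
        by_cases hx1 : 1 ≤ a
        · have r1 := h (a-1) b 1 (Or.inr (Or.inl rfl))
          rw [if_pos ⟨by omega, by omega, hy, hyN, Or.inl (by omega)⟩] at r1
          have r2 := h (a-1) b 2 (Or.inr (Or.inr rfl))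
          rw [if_pos ⟨by omega, by omega, hy, hyN, Or.inl (by omega)⟩] at r2
          rw [if_pos hx1, if_pos hx1, hinit 1 (Or.inr (Or.inl rfl)), r1, r2, pvInit,
            if_neg (fun hh => by omega : ¬ (a = 0 ∧ b = 1 ∧ (1:Int) = 0)), zero_add]
        · rw [if_neg hx1, if_neg hx1, hinit 1 (Or.inr (Or.inl rfl)), pvInit,
            if_neg (fun hh => by omega : ¬ (a = 0 ∧ b = 1 ∧ (1:Int) = 0))]
      · rw [pvStepA_at2 house dp a b hb, pvG_eq house a b 2 hx hy]
        have hnb : ¬ (a = 0 ∧ b = 1 ∧ (2:Int) = 0) := fun hh => by omega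
        rw [if_neg hnb, if_neg hb, if_neg (by norm_num : ¬ (2:Int) = 0),
          if_neg (by norm_num : ¬ (2:Int) = 1)]
        by_cases hg : 1 ≤ a ∧ 1 ≤ b ∧ pvH house a (b-1) = 0 ∧ pvH house (a-1) b = 0
        · have r0 := h (a-1) (b-1) 0 (Or.inl rfl)
          rw [if_pos ⟨by omega, by omega, by omega, by omega, Or.inl (by omega)⟩] at r0
          have r1 := h (a-1) (b-1) 1 (Or.inr (Or.inl rfl))
          rw [if_pos ⟨by omega, by omega, by omega, by omega, Or.inl (by omega)⟩] at r1
          have r2 := h (a-1) (b-1) 2 (Or.inr (Or.inr rfl))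
          rw [if_pos ⟨by omega, by omega, by omega, by omega, Or.inl (by omega)⟩] at r2
          rw [if_pos hg, if_pos hg, hinit 2 (Or.inr (Or.inr rfl)), r0, r1, r2, pvInit,
            if_neg (fun hh => by omega : ¬ (a = 0 ∧ b = 1 ∧ (2:Int) = 0)), zero_add]
        · rw [if_neg hg, if_neg hg, hinit 2 (Or.inr (Or.inr rfl)), pvInit,
            if_neg (fun hh => by omega : ¬ (a = 0 ∧ b = 1 ∧ (2:Int) = 0))]
  · rw [pvStepA_ne house dp x y a b d hab, h a b d hd]
    exact if_congr (by omega) rfl rfl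

lemma pvInner (N : Int) (house : List (List Int)) (x : Int) (hx : 0 ≤ x) (hxN : x < N) :
    ∀ (k : Nat) (dp : PySem.Dict (Int × Int × Int) Int), (k : Int) ≤ N → pvInv N house x 0 dp →
      pvInv N house x k
        ((PySem.List.pyRange 0 k 1).foldl (fun dp y => pvStepA house dp x y) dp) := by
  intro k
  induction k with
  | zero =>
    intro dp hk h0
    rw [show ((0:Nat):Int) = 0 from rfl, PySem.List.pyRange_one_eq_nil le_rfl]
    simpa using h0
  | succ k ih =>
    intro dp hk h0
    have hsplit : PySem.List.pyRange 0 ((k+1 : Nat) : Int) 1 =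
        PySem.List.pyRange 0 (k : Int) 1 ++ [(k : Int)] := by
      push_cast
      exact PySem.List.pyRange_one_succ_right (by omega)
    rw [hsplit, List.foldl_append]
    simp only [List.foldl_cons, List.foldl_nil]
    have hmid := ih dp (by omega) h0
    have hstep := pvStep_inv N house x (k : Int) _ hx hxN (by omega) (by omega) hmid
    have hc : ((k + 1 : Nat) : Int) = (k : Int) + 1 := by push_cast; ring
    rw [hc]
    exact hstep

lemma pvInv_shift (N : Int) (house : List (List Int)) (x : Int)
    (dp : PySem.Dict (Int × Int × Int) Int) (h : pvInv N house x N dp) : pvInv N house (x+1) 0 dp := by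
  intro a b d hd
  rw [h a b d hd]
  exact if_congr (by omega) rfl rfl

lemma pvOuter (N : Int) (house : List (List Int)) (hN : 0 ≤ N) :
    ∀ (k : Nat), (k : Int) ≤ N →
      pvInv N house k 0
        ((PySem.List.pyRange 0 k 1).foldl
          (fun dp x => (PySem.List.pyRange 0 N 1).foldl (fun dp y => pvStepA house dp x y) dp)
          (PySem.Dict.empty.insert (0, 1, 0) 1)) := by
  intro k
  induction k with
  | zero =>
    intro hk
    rw [show ((0:Nat):Int) = 0 from rfl, PySem.List.pyRange_one_eq_nil le_rfl]
    intro a b d hd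
    simp only [List.foldl_nil]
    rw [if_neg (by omega), pvRd_insert]
    by_cases h0 : a = 0 ∧ b = 1 ∧ d = 0
    · rw [if_pos h0, pvInit, if_pos h0]
    · rw [if_neg h0, pvInit, if_neg h0, pvRd, PySem.Dict.getD_empty]
  | succ k ih =>
    intro hk
    have hsplit : PySem.List.pyRange 0 ((k+1 : Nat) : Int) 1 =
        PySem.List.pyRange 0 (k : Int) 1 ++ [(k : Int)] := by
      push_cast
      exact PySem.List.pyRange_one_succ_right (by omega)
    rw [hsplit, List.foldl_append]
    simp only [List.foldl_cons, List.foldl_nil]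
    have hmid := ih (by omega)
    have hNN : ((N.toNat : Nat) : Int) = N := Int.toNat_of_nonneg hN
    have hrow := pvInner N house (k : Int) (by omega) (by omega) N.toNat _
      (le_of_eq hNN) hmid
    rw [hNN] at hrow
    have := pvInv_shift N house (k : Int) _ hrow
    have hc : ((k + 1 : Nat) : Int) = (k : Int) + 1 := by push_cast; ring
    rw [hc]
    exact this

-- ===== VERDICT (by name: the statement is the Claim_ definition above) =====
theorem count_movement_spec : Claim_equal_count_movement := by
  intro N house hdom hpre
  obtain ⟨hN2, hlen, hrows⟩ := hpre
  have hN : (0:Int) ≤ N := by omega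
  unfold Spec_count_movement
  simp only [count_movement, count_movement_alt]
  have hout := pvOuter N house hN N.toNat (le_of_eq (Int.toNat_of_nonneg hN))
  rw [Int.toNat_of_nonneg hN] at hout
  have g0 := hout (N-1) (N-1) 0 (Or.inl rfl)
  have g1 := hout (N-1) (N-1) 1 (Or.inr (Or.inl rfl))
  have g2 := hout (N-1) (N-1) 2 (Or.inr (Or.inr rfl))
  rw [if_pos ⟨by omega, by omega, by omega, by omega, Or.inl (by omega)⟩] at g0 g1 g2
  rw [g0, g1, g2]
  simp only [pvG]
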